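-- pv_equiv track=rewrite | github.com/ramsaroban/AttendanceProbability | attendance.py | attendance
-- ===== SOURCE A (Python) =====
-- def attendance(N):
--     # Initialize dp array
--     dp = [[0] * 4 for _ in range(N + 1)]
--
--     # Base cases
--     dp[1][0] = 1
--     dp[1][1] = 1
--     dp[1][2] = 0
--     dp[1][3] = 0
--
--     for i in range(2, N + 1):
--         dp[i][0] = dp[i-1][0] + dp[i-1][1] + dp[i-1][2] + dp[i-1][3]
--         dp[i][1] = dp[i-1][0]
--         dp[i][2] = dp[i-1][1]
--         dp[i][3] = dp[i-1][2]
--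
--     total_valid_sequences = dp[N][0] + dp[N][1] + dp[N][2] + dp[N][3]
--     sequences_missing_graduation = dp[N][1] + dp[N][2] + dp[N][3]
--
--     return f"{sequences_missing_graduation}/{total_valid_sequences}"
-- ===== SOURCE B (Python) =====
-- def _row_mul(r, B):
--     a, b, c, d = r
--     return (a * B[0][0] + b * B[1][0] + c * B[2][0] + d * B[3][0],
--             a * B[0][1] + b * B[1][1] + c * B[2][1] + d * B[3][1],
--             a * B[0][2] + b * B[1][2] + c * B[2][2] + d * B[3][2],
--             a * B[0][3] + b * B[1][3] + c * B[2][3] + d * B[3][3])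
--
--
-- def _mat_mul(A, B):
--     return (_row_mul(A[0], B), _row_mul(A[1], B), _row_mul(A[2], B), _row_mul(A[3], B))
--
--
-- def _dot(r, v):
--     return r[0] * v[0] + r[1] * v[1] + r[2] * v[2] + r[3] * v[3]
--
--
-- def attendance(N):
--     # 4x4 transition matrix of the recurrence, raised to the (N-1)-th power
--     # by binary exponentiation, then applied to the base vector.
--     M = ((1, 1, 1, 1),
--          (1, 0, 0, 0),
--          (0, 1, 0, 0),
--          (0, 0, 1, 0))
--     result = ((1, 0, 0, 0),
--               (0, 1, 0, 0),
--               (0, 0, 1, 0),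
--               (0, 0, 0, 1))
--     base = M
--     e = N - 1
--     while e > 0:
--         if e % 2 == 1:
--             result = _mat_mul(result, base)
--         base = _mat_mul(base, base)
--         e //= 2
--     v = (1, 1, 0, 0)
--     a, b, c, d = (_dot(result[0], v), _dot(result[1], v), _dot(result[2], v), _dot(result[3], v))
--     total = a + b + c + d
--     miss = b + c + d
--     return f"{miss}/{total}"
-- ===== Notes on version B (the rewrite author's own statement) =====
-- stated objective: faster
-- what changed: Replaces the O(N) dp-table iteration by binary exponentiation of the 4x4 transition matrix applied to the base vector.
import Mathlib
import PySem

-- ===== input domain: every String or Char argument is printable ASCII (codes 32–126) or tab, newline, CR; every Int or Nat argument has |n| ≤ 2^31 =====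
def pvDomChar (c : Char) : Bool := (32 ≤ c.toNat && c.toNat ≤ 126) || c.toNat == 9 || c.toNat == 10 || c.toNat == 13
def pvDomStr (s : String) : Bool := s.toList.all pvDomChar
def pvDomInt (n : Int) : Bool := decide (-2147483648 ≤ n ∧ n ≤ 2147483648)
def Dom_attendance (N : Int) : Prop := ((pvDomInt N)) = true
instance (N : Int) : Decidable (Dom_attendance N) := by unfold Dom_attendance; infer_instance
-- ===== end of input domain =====

-- B replaces A's O(N) dp-table iteration by binary exponentiation of the 4x4 transition
-- matrix (O(log N) matrix multiplications); proved to return the same string on Pre_.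


-- ===== PORT A =====
-- dp[r][c] read with default (in range under Pre_)
def pvGet2 (dp : List (List Int)) (r c : Int) : Int :=
  PySem.List.pyGetD (PySem.List.pyGetD dp r []) c 0

-- dp[r][c] = v (in range under Pre_)
def pvSet2 (dp : List (List Int)) (r c : Int) (v : Int) : List (List Int) :=
  PySem.List.pySetD dp r (PySem.List.pySetD (PySem.List.pyGetD dp r []) c v)

-- the body of A's for-loop, one assignment after the other
def pvStepA (dp : List (List Int)) (i : Int) : List (List Int) :=
  let dp1 := pvSet2 dp i 0
      (pvGet2 dp (i-1) 0 + pvGet2 dp (i-1) 1 + pvGet2 dp (i-1) 2 + pvGet2 dp (i-1) 3)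
  let dp2 := pvSet2 dp1 i 1 (pvGet2 dp1 (i-1) 0)
  let dp3 := pvSet2 dp2 i 2 (pvGet2 dp2 (i-1) 1)
  pvSet2 dp3 i 3 (pvGet2 dp3 (i-1) 2)

def attendance (N : Int) : String :=
  let dp := List.replicate (N + 1).toNat (List.replicate 4 (0 : Int))
  let dp := pvSet2 dp 1 0 1
  let dp := pvSet2 dp 1 1 1
  let dp := pvSet2 dp 1 2 0
  let dp := pvSet2 dp 1 3 0
  let dp := (PySem.List.pyRange 2 (N + 1) 1).foldl pvStepA dp
  let total := pvGet2 dp N 0 + pvGet2 dp N 1 + pvGet2 dp N 2 + pvGet2 dp N 3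
  let miss := pvGet2 dp N 1 + pvGet2 dp N 2 + pvGet2 dp N 3
  PySem.Int.toStr miss ++ "/" ++ PySem.Int.toStr total

-- ===== PORT B =====
def pvRowMul (r : Int × Int × Int × Int)
    (B : (Int × Int × Int × Int) × (Int × Int × Int × Int) × (Int × Int × Int × Int) × (Int × Int × Int × Int)) :
    Int × Int × Int × Int :=
  (r.1 * B.1.1 + r.2.1 * B.2.1.1 + r.2.2.1 * B.2.2.1.1 + r.2.2.2 * B.2.2.2.1,
   r.1 * B.1.2.1 + r.2.1 * B.2.1.2.1 + r.2.2.1 * B.2.2.1.2.1 + r.2.2.2 * B.2.2.2.2.1,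
   r.1 * B.1.2.2.1 + r.2.1 * B.2.1.2.2.1 + r.2.2.1 * B.2.2.1.2.2.1 + r.2.2.2 * B.2.2.2.2.2.1,
   r.1 * B.1.2.2.2 + r.2.1 * B.2.1.2.2.2 + r.2.2.1 * B.2.2.1.2.2.2 + r.2.2.2 * B.2.2.2.2.2.2)

def pvMatMul (A B : (Int × Int × Int × Int) × (Int × Int × Int × Int) × (Int × Int × Int × Int) × (Int × Int × Int × Int)) :
    (Int × Int × Int × Int) × (Int × Int × Int × Int) × (Int × Int × Int × Int) × (Int × Int × Int × Int) :=
  (pvRowMul A.1 B, pvRowMul A.2.1 B, pvRowMul A.2.2.1 B, pvRowMul A.2.2.2 B)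

def pvDot (r v : Int × Int × Int × Int) : Int :=
  r.1 * v.1 + r.2.1 * v.2.1 + r.2.2.1 * v.2.2.1 + r.2.2.2 * v.2.2.2

def pvM : (Int × Int × Int × Int) × (Int × Int × Int × Int) × (Int × Int × Int × Int) × (Int × Int × Int × Int) :=
  ((1, 1, 1, 1), (1, 0, 0, 0), (0, 1, 0, 0), (0, 0, 1, 0))

def pvI : (Int × Int × Int × Int) × (Int × Int × Int × Int) × (Int × Int × Int × Int) × (Int × Int × Int × Int) :=
  ((1, 0, 0, 0), (0, 1, 0, 0), (0, 0, 1, 0), (0, 0, 0, 1))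

-- B's while-loop, exponent as the Nat it is under Pre_ (e = N-1 ≥ 0)
def pvPowLoop (res base : (Int × Int × Int × Int) × (Int × Int × Int × Int) × (Int × Int × Int × Int) × (Int × Int × Int × Int)) :
    Nat → (Int × Int × Int × Int) × (Int × Int × Int × Int) × (Int × Int × Int × Int) × (Int × Int × Int × Int)
  | 0 => res
  | (e + 1) =>
    pvPowLoop (if (e + 1) % 2 == 1 then pvMatMul res base else res)
      (pvMatMul base base) ((e + 1) / 2)
decreasing_by omega

def attendance_alt (N : Int) : String :=
  let P := pvPowLoop pvI pvM (N - 1).toNat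
  let v : Int × Int × Int × Int := (1, 1, 0, 0)
  let a := pvDot P.1 v
  let b := pvDot P.2.1 v
  let c := pvDot P.2.2.1 v
  let d := pvDot P.2.2.2 v
  let total := a + b + c + d
  let miss := b + c + d
  PySem.Int.toStr miss ++ "/" ++ PySem.Int.toStr total

-- ===== PRECONDITION & SPEC =====
-- For N ≤ 0 A raises IndexError (the base-case write dp[1][0] on a table with no row 1).
def Pre_attendance (N : Int) : Prop := 1 ≤ N
instance (N : Int) : Decidable (Pre_attendance N) := by unfold Pre_attendance; infer_instance
def pvWitness_attendance : Int := 5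

def Spec_attendance (N : Int) (out : String) : Prop := out = attendance_alt N
instance (N : Int) (out : String) : Decidable (Spec_attendance N out) := by unfold Spec_attendance; infer_instance

-- ===== CLAIM (what is proved, stated in full; the proofs are below) =====
def Claim_equal_attendance : Prop := ∀ (N : Int), Dom_attendance N → Pre_attendance N → Spec_attendance N (attendance N)

-- ===== LEMMAS AND PROOFS =====

-- reference recurrence: pvF k = dp[k+1] as a 4-vector
def pvStep (v : Int × Int × Int × Int) : Int × Int × Int × Int :=
  (v.1 + v.2.1 + v.2.2.1 + v.2.2.2, v.1, v.2.1, v.2.2.1)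

def pvF : Nat → Int × Int × Int × Int
  | 0 => (1, 1, 0, 0)
  | (k + 1) => pvStep (pvF k)

def pvRow (v : Int × Int × Int × Int) : List Int := [v.1, v.2.1, v.2.2.1, v.2.2.2]

def pvNPow (b : (Int × Int × Int × Int) × (Int × Int × Int × Int) × (Int × Int × Int × Int) × (Int × Int × Int × Int)) :
    Nat → (Int × Int × Int × Int) × (Int × Int × Int × Int) × (Int × Int × Int × Int) × (Int × Int × Int × Int)
  | 0 => pvI
  | (k + 1) => pvMatMul b (pvNPow b k)

theorem pvMatMul_assoc (A B C : (Int × Int × Int × Int) × (Int × Int × Int × Int) × (Int × Int × Int × Int) × (Int × Int × Int × Int)) :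
    pvMatMul (pvMatMul A B) C = pvMatMul A (pvMatMul B C) := by
  obtain ⟨⟨_,_,_,_⟩,⟨_,_,_,_⟩,⟨_,_,_,_⟩,⟨_,_,_,_⟩⟩ := A
  obtain ⟨⟨_,_,_,_⟩,⟨_,_,_,_⟩,⟨_,_,_,_⟩,⟨_,_,_,_⟩⟩ := B
  obtain ⟨⟨_,_,_,_⟩,⟨_,_,_,_⟩,⟨_,_,_,_⟩,⟨_,_,_,_⟩⟩ := C
  simp only [pvMatMul, pvRowMul, Prod.mk.injEq]
  and_intros <;> ring

theorem pvMatMul_one (A : (Int × Int × Int × Int) × (Int × Int × Int × Int) × (Int × Int × Int × Int) × (Int × Int × Int × Int)) :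
    pvMatMul pvI A = A := by
  obtain ⟨⟨_,_,_,_⟩,⟨_,_,_,_⟩,⟨_,_,_,_⟩,⟨_,_,_,_⟩⟩ := A
  simp only [pvMatMul, pvRowMul, pvI, Prod.mk.injEq]
  and_intros <;> ring

theorem pvNPow_sq (b : (Int × Int × Int × Int) × (Int × Int × Int × Int) × (Int × Int × Int × Int) × (Int × Int × Int × Int))
    (k : Nat) : pvNPow (pvMatMul b b) k = pvNPow b (2 * k) := by
  induction k with
  | zero => rfl
  | succ k ih =>
      have h2 : 2 * (k + 1) = (2 * k + 1) + 1 := by omega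
      rw [h2]
      show pvMatMul (pvMatMul b b) (pvNPow (pvMatMul b b) k) = pvNPow b ((2 * k + 1) + 1)
      rw [ih]
      show _ = pvMatMul b (pvNPow b (2 * k + 1))
      show _ = pvMatMul b (pvMatMul b (pvNPow b (2 * k)))
      rw [pvMatMul_assoc]

theorem pvMatMul_one_right (A : (Int × Int × Int × Int) × (Int × Int × Int × Int) × (Int × Int × Int × Int) × (Int × Int × Int × Int)) :
    pvMatMul A pvI = A := by
  obtain ⟨⟨_,_,_,_⟩,⟨_,_,_,_⟩,⟨_,_,_,_⟩,⟨_,_,_,_⟩⟩ := A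
  simp only [pvMatMul, pvRowMul, pvI, Prod.mk.injEq]
  and_intros <;> ring

theorem pvPowLoop_eq (e : Nat) :
    ∀ res base, pvPowLoop res base e = pvMatMul res (pvNPow base e) := by
  induction e using Nat.strong_induction_on with
  | _ e ih =>
    intro res base
    match e with
    | 0 => simp [pvPowLoop, pvNPow, pvMatMul_one_right]
    | (k + 1) =>
      rw [pvPowLoop, ih ((k + 1) / 2) (by omega), pvNPow_sq]
      by_cases h : (k + 1) % 2 = 1
      · have h2 : k + 1 = 2 * ((k + 1) / 2) + 1 := by omega
        simp only [h, BEq.rfl, if_true]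
        rw [pvMatMul_assoc]
        congr 1
        conv_rhs => rw [h2]
        rfl
      · have h0 : (k + 1) % 2 = 0 := by omega
        have h2 : 2 * ((k + 1) / 2) = k + 1 := by omega
        simp only [h0, if_neg (by decide : ¬ ((0 == 1) = true))]
        rw [h2]

-- matrix-times-vector, proof-side abbreviation for the four dots in attendance_alt
def pvMatVec (A : (Int × Int × Int × Int) × (Int × Int × Int × Int) × (Int × Int × Int × Int) × (Int × Int × Int × Int))
    (v : Int × Int × Int × Int) : Int × Int × Int × Int :=
  (pvDot A.1 v, pvDot A.2.1 v, pvDot A.2.2.1 v, pvDot A.2.2.2 v)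

theorem pvMatVec_mul (A B : (Int × Int × Int × Int) × (Int × Int × Int × Int) × (Int × Int × Int × Int) × (Int × Int × Int × Int))
    (v : Int × Int × Int × Int) : pvMatVec (pvMatMul A B) v = pvMatVec A (pvMatVec B v) := by
  obtain ⟨⟨_,_,_,_⟩,⟨_,_,_,_⟩,⟨_,_,_,_⟩,⟨_,_,_,_⟩⟩ := A
  obtain ⟨⟨_,_,_,_⟩,⟨_,_,_,_⟩,⟨_,_,_,_⟩,⟨_,_,_,_⟩⟩ := B
  obtain ⟨_,_,_,_⟩ := v
  simp only [pvMatVec, pvMatMul, pvRowMul, pvDot, Prod.mk.injEq]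
  and_intros <;> ring

theorem pvMatVec_M (v : Int × Int × Int × Int) : pvMatVec pvM v = pvStep v := by
  obtain ⟨_,_,_,_⟩ := v
  simp only [pvMatVec, pvM, pvDot, pvStep, Prod.mk.injEq]
  and_intros <;> ring

theorem pvMatVec_pow (e : Nat) : pvMatVec (pvPowLoop pvI pvM e) (1, 1, 0, 0) = pvF e := by
  rw [pvPowLoop_eq, pvMatMul_one]
  induction e with
  | zero => decide
  | succ e ih => rw [pvNPow, pvMatVec_mul, ih, pvMatVec_M]; rfl

-- ---- A side ----

-- full dp table after processing rows 2..k (rows 1..k filled, rest zero)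
def pvDP (n k : Nat) : List (List Int) :=
  (List.range (n + 1)).map (fun j => if 1 ≤ j ∧ j ≤ k then pvRow (pvF (j - 1)) else [0, 0, 0, 0])

-- the initial dp of attendance, after the four base-case assignments
def pvInit (n : Nat) : List (List Int) :=
  pvSet2 (pvSet2 (pvSet2 (pvSet2 (List.replicate (n + 1) (List.replicate 4 (0 : Int))) 1 0 1) 1 1 1) 1 2 0) 1 3 0

theorem pvGetD_set_ne (l : List (List Int)) (m j : Nat) (d : List Int) (h : j ≠ m) :
    (l.set m d).getD j [] = l.getD j [] := by
  simp [List.getD, List.getElem?_set_ne (by omega : m ≠ j)]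

theorem pvGetD_set_self (l : List (List Int)) (m : Nat) (d : List Int) (h : m < l.length) :
    (l.set m d).getD m [] = d := by
  simp [List.getD, h]

theorem pvSet_map_range (n m : Nat) (f : Nat → List Int) (x : List Int) :
    ((List.range n).map f).set m x = (List.range n).map (fun j => if m = j then x else f j) := by
  apply List.ext_getElem <;> simp [List.getElem_set]

theorem pvDP_length (n k : Nat) : (pvDP n k).length = n + 1 := by simp [pvDP]

theorem pvDP_getD (n k j : Nat) (hj : j ≤ n) :
    (pvDP n k).getD j [] = if 1 ≤ j ∧ j ≤ k then pvRow (pvF (j - 1)) else [0, 0, 0, 0] := by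
  simp [pvDP, List.getD, Nat.lt_succ_of_le hj]

theorem pvInit_eq (n : Nat) (hn : 1 ≤ n) : pvInit n = pvDP n 1 := by
  obtain ⟨m, rfl⟩ : ∃ m, n = m + 1 := ⟨n - 1, by omega⟩
  have h1 : pvInit (m + 1) = [0,0,0,0] :: [1,1,0,0] :: List.replicate m (List.replicate 4 (0:Int)) := by
    simp [pvInit, pvSet2, PySem.List.pySetD_of_nonneg, PySem.List.pyGetD_of_nonneg,
      List.replicate_succ, List.set]
  have h2 : pvDP (m + 1) 1 = [0,0,0,0] :: [1,1,0,0] :: List.replicate m (List.replicate 4 (0:Int)) := by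
    simp [pvDP, List.range_succ_eq_map, List.map_map]
    constructor
    · decide
    · have h : List.replicate m ([0,0,0,0] : List Int) = (List.range m).map (fun _ => [0,0,0,0]) := by
        simp
      rw [h]; apply List.map_congr_left; intro j hj; simp
  rw [h1, h2]

theorem pvStepA_eq (n k : Nat) (hk1 : 1 ≤ k) (hk : k + 1 ≤ n) :
    pvStepA (pvDP n k) (((k + 1 : Nat) : Int)) = pvDP n (k + 1) := by
  have hc : ((k + 1 : Nat) : Int) - 1 = ((k : Nat) : Int) := by push_cast; ring
  have hL : (pvDP n k).length = n + 1 := pvDP_length n k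
  have e0 : (pvDP n k).getD (k + 1) [] = [0, 0, 0, 0] := by
    rw [pvDP_getD n k (k + 1) (by omega)]; rw [if_neg (by omega)]
  rcases h : pvF (k - 1) with ⟨a, b, c, d⟩
  have ek : (pvDP n k).getD k [] = [a, b, c, d] := by
    rw [pvDP_getD n k k (by omega), if_pos (by omega), h]; rfl
  have hFk : pvF k = (a + b + c + d, a, b, c) := by
    obtain ⟨k', rfl⟩ : ∃ k', k = k' + 1 := ⟨k - 1, by omega⟩
    show pvStep (pvF k') = _
    simp at h ⊢; rw [h]; rfl
  simp only [pvStepA, pvSet2, pvGet2, hc, PySem.List.pySetD_natCast, PySem.List.pyGetD_natCast]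
  rw [e0, ek]
  have g1 : ∀ X : List Int, ((pvDP n k).set (k+1) X).getD k [] = [a, b, c, d] := by
    intro X; rw [pvGetD_set_ne _ _ _ _ (by omega), ek]
  have g2 : ∀ X : List Int, ((pvDP n k).set (k+1) X).getD (k+1) [] = X := by
    intro X; exact pvGetD_set_self _ _ _ (by rw [hL]; omega)
  simp only [g1, g2, List.set_set]
  simp [PySem.List.pySetD_of_nonneg, PySem.List.pyGetD_of_nonneg, List.set]
  unfold pvDP
  rw [pvSet_map_range]
  apply List.map_congr_left
  intro j hj
  simp only [List.mem_range] at hj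
  by_cases hj1 : j = k + 1
  · subst hj1
    rw [if_pos rfl, if_pos (by omega)]
    simp [pvRow, hFk]
  · rw [if_neg (by omega)]
    split_ifs <;> first | rfl | omega

theorem pvLoop_eq (n : Nat) (hn : 1 ≤ n) : ∀ k, 1 ≤ k → k ≤ n →
    (PySem.List.pyRange 2 ((k : Int) + 1) 1).foldl pvStepA (pvInit n) = pvDP n k := by
  intro k
  induction k with
  | zero => omega
  | succ k ih =>
    intro _ hk
    by_cases hk1 : k = 0
    · subst hk1
      rw [show (((0 + 1 : Nat) : Int) + 1) = 2 by norm_num,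
        PySem.List.pyRange_one_eq_nil (by norm_num)]
      exact pvInit_eq n hn
    · have hcast : (((k + 1 : Nat) : Int) + 1) = ((k : Int) + 1) + 1 := by push_cast; ring
      rw [hcast, PySem.List.pyRange_one_succ_right (by omega), List.foldl_append]
      rw [ih (by omega) (by omega)]
      simp only [List.foldl_cons, List.foldl_nil]
      have : ((k : Int) + 1) = ((k + 1 : Nat) : Int) := by push_cast; ring
      rw [this]
      exact pvStepA_eq n k (by omega) (by omega)

-- ===== VERDICT (by name: the statement is the Claim_ definition above) =====
theorem attendance_spec : Claim_equal_attendance := by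
  intro N _ hPre
  unfold Pre_attendance at hPre
  unfold Spec_attendance
  obtain ⟨n, rfl, hn⟩ : ∃ n : Nat, N = (n : Int) ∧ 1 ≤ n :=
    ⟨N.toNat, by omega, by omega⟩
  rcases hv : pvF (n - 1) with ⟨a, b, c, d⟩
  -- B side
  have hB := pvMatVec_pow (n - 1)
  rw [hv] at hB
  have he : ((n : Int) - 1).toNat = n - 1 := by omega
  have hBalt : attendance_alt (n : Int) =
      PySem.Int.toStr (b + c + d) ++ "/" ++ PySem.Int.toStr (a + b + c + d) := by
    simp only [attendance_alt, he]
    rcases hP : pvPowLoop pvI pvM (n - 1) with ⟨p0, p1, p2, p3⟩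
    rw [hP] at hB
    simp only [pvMatVec, Prod.mk.injEq] at hB
    obtain ⟨h0, h1, h2, h3⟩ := hB
    simp only [h0, h1, h2, h3]
  -- A side
  have hfold := pvLoop_eq n hn n hn (le_refl n)
  have hrow : (pvDP n n).getD n [] = [a, b, c, d] := by
    rw [pvDP_getD n n n (le_refl n), if_pos (by omega), hv]; rfl
  have hA : attendance (n : Int) =
      PySem.Int.toStr (b + c + d) ++ "/" ++ PySem.Int.toStr (a + b + c + d) := by
    simp only [attendance]
    have htn : ((n : Int) + 1).toNat = n + 1 := by omega
    rw [htn]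
    have hinit : pvSet2 (pvSet2 (pvSet2 (pvSet2
        (List.replicate (n + 1) (List.replicate 4 (0 : Int))) 1 0 1) 1 1 1) 1 2 0) 1 3 0 = pvInit n := rfl
    rw [hinit, hfold]
    simp only [pvGet2, PySem.List.pyGetD_natCast, hrow]
    simp [PySem.List.pyGetD_of_nonneg]
  rw [hA, hBalt]
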